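-- pv_equiv track=rewrite | github.com/sanchbok/ml_tasks | intern/match_groups/task.py | extend_matches
-- ===== SOURCE A (Python) =====
-- from typing import List
-- from typing import Tuple
--
-- def extend_matches(pairs: List[Tuple[int, int]]) -> List[Tuple[int, int]]:
--     ''' Find all matches between pairs '''
--     matches = dict(sorted([(i, j) if i < j else (j, i) for i, j in pairs]))
--
--     all_matches = []
--     for main_item, additional_item in matches.items():
--         all_matches.append((main_item, additional_item))
--         while additional_item in matches:
--             new_item = matches[additional_item]
--             all_matches.append((main_item, new_item))
--             additional_item = new_item
--
--     return all_matches
-- ===== SOURCE B (Python) =====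
-- def extend_matches(pairs):
--     ''' Find all matches between pairs '''
--     matches = dict(sorted([(i, j) if i < j else (j, i) for i, j in pairs]))
--
--     # memo table: full forward chain of each key, built by reusing the
--     # already-computed chain of its (larger) successor
--     reach = {}
--     for i in sorted(matches, reverse=True):
--         j = matches[i]
--         reach[i] = [j] + reach.get(j, [])
--
--     all_matches = []
--     for i in matches:
--         for v in reach[i]:
--             all_matches.append((i, v))
--     return all_matches
-- ===== Notes on version B (the rewrite author's own statement) =====
-- stated objective: alternative
-- what changed: Instead of re-walking the successor chain from scratch for every key, B makes one descending-order pass that memoizes each key's full forward chain by prepending to the already-computed chain of its successor, then a second ascending pass just emits the precomputed chains.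
-- outside the precondition, e.g. on extend_matches([(3, 3), (3, 5)]): A returns [(3, 5)], B returns [(3, 5)]; on extend_matches([(1, 1)]): A does not finish within the time limit, B returns [(1, 1)]
import Mathlib
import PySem

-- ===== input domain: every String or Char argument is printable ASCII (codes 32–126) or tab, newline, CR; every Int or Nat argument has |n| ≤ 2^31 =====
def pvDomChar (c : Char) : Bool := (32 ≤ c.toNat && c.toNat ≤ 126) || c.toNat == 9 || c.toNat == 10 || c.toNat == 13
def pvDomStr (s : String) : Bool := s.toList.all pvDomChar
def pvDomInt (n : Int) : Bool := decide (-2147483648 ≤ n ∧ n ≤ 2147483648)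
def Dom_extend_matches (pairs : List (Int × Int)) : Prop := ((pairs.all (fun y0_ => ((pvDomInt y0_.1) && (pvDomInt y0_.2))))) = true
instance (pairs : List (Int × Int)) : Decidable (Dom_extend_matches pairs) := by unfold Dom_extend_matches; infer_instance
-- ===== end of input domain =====

-- B replaces A's per-key re-walk of the successor chain by one descending-order memo pass
-- (reach[i] = [matches[i]] + reach.get(matches[i], [])) plus an ascending emit pass (objective: alternative).

-- ===== PORT A =====
-- matches = dict(sorted([(i, j) if i < j else (j, i) for i, j in pairs])) — this line is
-- identical in A and in B, so both ports share it
def pvBuildMatches (pairs : List (Int × Int)) : PySem.Dict Int Int :=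
  PySem.Dict.ofList
    (PySem.List.sorted2 (pairs.map (fun p => if p.1 < p.2 then (p.1, p.2) else (p.2, p.1)))
      (fun p => p.1) (fun p => p.2) false)

-- the `while additional_item in matches:` loop; the fuel only makes the recursion total:
-- inside Pre_ every dict entry satisfies key < value, so the walk visits strictly
-- increasing keys and d.size steps always suffice (proved below)
def pvChainA (d : PySem.Dict Int Int) (main : Int) :
    Nat → Int → List (Int × Int) → List (Int × Int)
  | 0, _, acc => acc
  | fuel+1, j, acc =>
    if d.contains j then
      pvChainA d main fuel (d.getD j 0) (acc ++ [(main, d.getD j 0)])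
    else acc

def extend_matches (pairs : List (Int × Int)) : List (Int × Int) :=
  let d := pvBuildMatches pairs
  d.items.foldl (fun acc p => pvChainA d p.1 d.size p.2 (acc ++ [p])) []

-- ===== PORT B =====
def extend_matches_alt (pairs : List (Int × Int)) : List (Int × Int) :=
  let d := pvBuildMatches pairs
  -- first pass: keys in descending order, reach[i] = [matches[i]] + reach.get(matches[i], [])
  let reach := (PySem.List.sorted d.keys (fun x => x) true).foldl
      (fun r i => r.insert i (d.getD i 0 :: r.getD (d.getD i 0) [])) PySem.Dict.empty
  -- second pass: emit the precomputed chains in the dict's (ascending) key order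
  d.keys.foldl (fun acc i => acc ++ (reach.getD i []).map (fun v => (i, v))) []

-- ===== PRECONDITION & SPEC =====
-- Pre_ excludes inputs containing a self-pair (i, i): on those the final dict can map a key
-- to itself and A's while-loop runs forever; A still returns when some other pair overwrites
-- the self-mapping (e.g. [(3,3),(3,5)]), and B returns the same value there anyway.
def Pre_extend_matches (pairs : List (Int × Int)) : Prop := ∀ p ∈ pairs, p.1 ≠ p.2
instance (pairs : List (Int × Int)) : Decidable (Pre_extend_matches pairs) := by
  unfold Pre_extend_matches; infer_instance
def pvWitness_extend_matches : (List (Int × Int)) := [(1, 2), (2, 3)]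

def Spec_extend_matches (pairs : List (Int × Int)) (out : List (Int × Int)) : Prop :=
  out = extend_matches_alt pairs
instance (pairs : List (Int × Int)) (out : List (Int × Int)) :
    Decidable (Spec_extend_matches pairs out) := by unfold Spec_extend_matches; infer_instance

-- ===== CLAIM (what is proved, stated in full; the proofs are below) =====
def Claim_equal_extend_matches : Prop := ∀ (pairs : List (Int × Int)),
  Dom_extend_matches pairs → Pre_extend_matches pairs →
  Spec_extend_matches pairs (extend_matches pairs)

-- ===== LEMMAS AND PROOFS =====

-- the list of chain values A's while-loop emits, as a pure function (fuel-indexed)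
def pvVals (d : PySem.Dict Int Int) : Nat → Int → List Int
  | 0, _ => []
  | fuel+1, j => if d.contains j then d.getD j 0 :: pvVals d fuel (d.getD j 0) else []

-- number of keys ≥ j: the termination measure of the chain walk
def pvBound (d : PySem.Dict Int Int) (j : Int) : Nat :=
  (d.keys.filter (fun k => decide (j ≤ k))).length

theorem pvChainA_eq (d : PySem.Dict Int Int) (main : Int) :
    ∀ (fuel : Nat) (j : Int) (acc : List (Int × Int)),
    pvChainA d main fuel j acc = acc ++ (pvVals d fuel j).map (fun v => (main, v)) := by
  intro fuel
  induction fuel with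
  | zero => intro j acc; simp [pvChainA, pvVals]
  | succ n ih =>
    intro j acc
    by_cases h : d.contains j
    · simp [pvChainA, pvVals, h, ih]
    · simp [pvChainA, pvVals, h]

theorem pvBound_pos (d : PySem.Dict Int Int) (j : Int) (h : d.contains j = true) :
    1 ≤ pvBound d j := by
  have hj : j ∈ d.keys := (PySem.Dict.contains_iff_mem_keys d j).mp h
  have hm : j ∈ d.keys.filter (fun k => decide (j ≤ k)) := List.mem_filter.mpr ⟨hj, by simp⟩
  exact List.length_pos_of_mem hm

theorem pvContains_getD (d : PySem.Dict Int Int)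
    (hkv : ∀ p ∈ d.items, p.1 < p.2) (hnd : d.keys.Nodup)
    (j : Int) (h : d.contains j = true) :
    j < d.getD j 0 ∧ (j, d.getD j 0) ∈ d.items := by
  cases hv : d.get? j with
  | none =>
    rw [PySem.Dict.get?_eq_none_iff_contains] at hv
    simp [h] at hv
  | some v =>
    have hmem := PySem.Dict.mem_items_of_get?_eq_some d hv
    have hg : d.getD j 0 = v := PySem.Dict.getD_of_mem_items d hmem hnd 0
    rw [hg]
    exact ⟨hkv _ hmem, hmem⟩

theorem pvBound_succ_lt (d : PySem.Dict Int Int)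
    (hkv : ∀ p ∈ d.items, p.1 < p.2) (hnd : d.keys.Nodup)
    (j : Int) (h : d.contains j = true) :
    pvBound d (d.getD j 0) < pvBound d j := by
  have hj : j ∈ d.keys := (PySem.Dict.contains_iff_mem_keys d j).mp h
  have hlt : j < d.getD j 0 := (pvContains_getD d hkv hnd j h).1
  set v := d.getD j 0 with hv
  unfold pvBound
  have hperm : d.keys.Perm (j :: d.keys.erase j) := List.perm_cons_erase hj
  rw [← List.countP_eq_length_filter, ← List.countP_eq_length_filter,
    hperm.countP_eq, hperm.countP_eq]
  have hmono : List.countP (fun k => decide (v ≤ k)) (d.keys.erase j)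
      ≤ List.countP (fun k => decide (j ≤ k)) (d.keys.erase j) := by
    apply List.countP_mono_left
    intro a _ ha
    simp at ha ⊢
    omega
  simp [List.countP_cons]
  have h1 : ¬ (v ≤ j) := by omega
  simp [h1]
  omega

theorem pvVals_stable (d : PySem.Dict Int Int)
    (hkv : ∀ p ∈ d.items, p.1 < p.2) (hnd : d.keys.Nodup) :
    ∀ (n m : Nat) (j : Int), pvBound d j ≤ n → pvBound d j ≤ m →
    pvVals d n j = pvVals d m j := by
  intro n
  induction n with
  | zero =>
    intro m j hn hm
    cases m with
    | zero => rfl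
    | succ m =>
      have hc : d.contains j = false := by
        by_contra hcc
        have := pvBound_pos d j (by simpa using hcc)
        omega
      simp [pvVals, hc]
  | succ n ih =>
    intro m j hn hm
    cases m with
    | zero =>
      have hc : d.contains j = false := by
        by_contra hcc
        have := pvBound_pos d j (by simpa using hcc)
        omega
      simp [pvVals, hc]
    | succ m =>
      by_cases hc : d.contains j = true
      · have hb := pvBound_succ_lt d hkv hnd j hc
        simp [pvVals, hc]
        exact ih m (d.getD j 0) (by omega) (by omega)
      · simp at hc
        simp [pvVals, hc]

theorem pvMemo (d : PySem.Dict Int Int)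
    (hkv : ∀ p ∈ d.items, p.1 < p.2) (hnd : d.keys.Nodup) :
    ∀ (ds : List Int) (r : PySem.Dict Int (List Int)),
      ds.Pairwise (· > ·) → (∀ i ∈ ds, i ∈ d.keys) →
      (∀ j, j ∈ d.keys → j ∉ ds → r.getD j [] = pvVals d d.size j) →
      (∀ j, r.contains j = true → j ∈ d.keys ∧ j ∉ ds) →
      ∀ j, j ∈ d.keys →
        (ds.foldl (fun r i => r.insert i (d.getD i 0 :: r.getD (d.getD i 0) [])) r).getD j []
          = pvVals d d.size j := by
  intro ds
  induction ds with
  | nil =>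
    intro r _ _ hcorr _ j hj
    exact hcorr j hj (by simp)
  | cons i tl ih =>
    intro r hpw hsub hcorr hcont j hj
    have hik : i ∈ d.keys := hsub i (by simp)
    have hic : d.contains i = true := (PySem.Dict.contains_iff_mem_keys d i).mpr hik
    obtain ⟨hilt, himem⟩ := pvContains_getD d hkv hnd i hic
    set v := d.getD i 0 with hvdef
    have hvnotds : ∀ x ∈ i :: tl, x < v := by
      intro x hx
      rcases List.mem_cons.mp hx with rfl | hx
      · omega
      · have := (List.pairwise_cons.mp hpw).1 x hx
        omega
    -- v's chain is already in r (or v is not a key at all)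
    have hvr : r.getD v [] = pvVals d d.size v := by
      by_cases hvk : v ∈ d.keys
      · exact hcorr v hvk (fun hmem => by have := hvnotds v hmem; omega)
      · have hvc : d.contains v = false := by
          rw [← PySem.Dict.contains_iff_mem_keys d v] at hvk
          simpa using hvk
        have hrc : r.contains v = false := by
          by_contra hrc
          exact hvk (hcont v (by simpa using hrc)).1
        rw [PySem.Dict.getD_of_not_contains r [] hrc]
        cases hsz : d.size with
        | zero => simp [pvVals]
        | succ m => simp [pvVals, hvc]
    -- size is a successor since i is a key
    obtain ⟨m, hm⟩ : ∃ m, d.size = m + 1 := by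
      have : d.size = d.keys.length := by
        simp [PySem.Dict.size, PySem.Dict.keys]
      cases hk : d.keys with
      | nil => rw [hk] at hik; simp at hik
      | cons a t => exact ⟨t.length, by rw [this, hk]; simp⟩
    have hbv : pvBound d v < m + 1 := by
      have h0 := pvBound_succ_lt d hkv hnd i hic
      have h1 : pvBound d i ≤ d.keys.length := List.length_filter_le _ _
      have h2 : d.size = d.keys.length := by
        simp [PySem.Dict.size, PySem.Dict.keys]
      rw [← hvdef] at h0
      omega
    have hstep : (v :: r.getD v []) = pvVals d d.size i := by
      rw [hvr, hm]
      have hunf : pvVals d (m + 1) i = d.getD i 0 :: pvVals d m (d.getD i 0) := by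
        simp [pvVals, hic]
      rw [hunf, ← hvdef]
      -- tail: pvVals d (m+1) v = pvVals d m v by fuel stability
      congr 1
      exact pvVals_stable d hkv hnd (m + 1) m v (by omega) (by omega)
    simp only [List.foldl_cons]
    apply ih
    · exact (List.pairwise_cons.mp hpw).2
    · intro x hx; exact hsub x (by simp [hx])
    · intro x hxk hxtl
      by_cases hxi : x = i
      · subst hxi
        rw [PySem.Dict.getD_insert]
        simp [← hvdef, hstep]
      · rw [PySem.Dict.getD_insert]
        simp [hxi]
        exact hcorr x hxk (by simp [hxi, hxtl])
    · intro x hx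
      rw [PySem.Dict.contains_insert] at hx
      rcases (Bool.or_eq_true _ _).mp hx with hx | hx
      · have : x = i := by simpa using hx
        subst this
        refine ⟨hik, ?_⟩
        intro hmem
        have := (List.pairwise_cons.mp hpw).1 x hmem
        omega
      · obtain ⟨h1, h2⟩ := hcont x hx
        exact ⟨h1, fun hmem => h2 (by simp [hmem])⟩
    · exact hj

-- items of a dict built by inserting a list into d0 come from d0 or from the list
theorem pvMemItemsFoldl : ∀ (l : List (Int × Int)) (d0 : PySem.Dict Int Int)
    (p : Int × Int),
    p ∈ (l.foldl (fun d q => d.insert q.1 q.2) d0).items → p ∈ d0.items ∨ p ∈ l := by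
  intro l
  induction l with
  | nil => intro d0 p hp; exact Or.inl hp
  | cons q t ih =>
    intro d0 p hp
    simp only [List.foldl_cons] at hp
    rcases ih _ p hp with h | h
    · rcases (PySem.Dict.mem_items_insert _ _ _ _).mp h with h | ⟨h, _⟩
      · right; simp [h]
      · left; exact h
    · right; simp [h]

theorem pvBuild_kv (pairs : List (Int × Int)) (hpre : Pre_extend_matches pairs) :
    ∀ p ∈ (pvBuildMatches pairs).items, p.1 < p.2 := by
  intro p hp
  have h1 : p ∈ PySem.List.sorted2
      (pairs.map (fun p => if p.1 < p.2 then (p.1, p.2) else (p.2, p.1)))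
      (fun p => p.1) (fun p => p.2) false ∨ False := by
    have := pvMemItemsFoldl _ PySem.Dict.empty p hp
    simpa [PySem.Dict.empty] using this.symm.imp id id
  rcases h1 with h1 | h1
  · have h2 : p ∈ pairs.map (fun p => if p.1 < p.2 then (p.1, p.2) else (p.2, p.1)) :=
      (PySem.List.sorted2_perm _ _ _ _).mem_iff.mp h1
    obtain ⟨q, hq, rfl⟩ := List.mem_map.mp h2
    have hne := hpre q hq
    by_cases hlt : q.1 < q.2
    · simp [hlt]
    · simp only [hlt, if_false]
      omega
  · exact h1.elim

-- ===== VERDICT (by name: the statement is the Claim_ definition above) =====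
theorem extend_matches_spec : Claim_equal_extend_matches := by
  intro pairs _ hpre
  unfold Spec_extend_matches extend_matches extend_matches_alt
  set d := pvBuildMatches pairs with hd
  have hnd : d.keys.Nodup := PySem.Dict.nodup_keys_ofList _
  have hkv : ∀ p ∈ d.items, p.1 < p.2 := pvBuild_kv pairs hpre
  set ds := PySem.List.sorted d.keys (fun x => x) true with hds
  have hdsmem : ∀ x, x ∈ ds ↔ x ∈ d.keys := fun x =>
    PySem.List.mem_sorted d.keys (fun x => x) true x
  have hdspw : ds.Pairwise (· > ·) := by
    have h1 : ds.Pairwise (fun a b => b ≤ a) :=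
      PySem.List.sorted_pairwise_rev d.keys (fun x => x)
    have h2 : ds.Nodup := ((PySem.List.sorted_perm d.keys (fun x => x) true).nodup_iff).mpr hnd
    exact (h1.and h2).imp (fun h => lt_of_le_of_ne h.1 (Ne.symm h.2))
  set reach := ds.foldl
      (fun r i => r.insert i (d.getD i 0 :: r.getD (d.getD i 0) [])) PySem.Dict.empty
    with hreach
  have hreachD : ∀ k ∈ d.keys, reach.getD k [] = pvVals d d.size k := by
    intro k hk
    apply pvMemo d hkv hnd ds PySem.Dict.empty hdspw
    · intro i hi; exact (hdsmem i).mp hi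
    · intro j hjk hjds; exact absurd ((hdsmem j).mpr hjk) hjds
    · intro j hj; simp [PySem.Dict.empty, PySem.Dict.contains] at hj
    · exact hk
  show List.foldl (fun acc p => pvChainA d p.1 d.size p.2 (acc ++ [p])) [] d.items
    = List.foldl (fun acc i => acc ++ List.map (fun v => (i, v)) (reach.getD i [])) [] d.keys
  rw [PySem.Dict.items_eq_map_keys d hnd 0, List.foldl_map]
  apply PySem.List.foldl_congr_mem
  intro acc k hk
  have hkc : d.contains k = true := (PySem.Dict.contains_iff_mem_keys d k).mpr hk
  obtain ⟨m, hm⟩ : ∃ m, d.size = m + 1 := by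
    have hsz : d.size = d.keys.length := by simp [PySem.Dict.size, PySem.Dict.keys]
    cases hkl : d.keys with
    | nil => rw [hkl] at hk; simp at hk
    | cons a t => exact ⟨t.length, by rw [hsz, hkl]; simp⟩
  have hbk : pvBound d (d.getD k 0) < m + 1 := by
    have h0 := pvBound_succ_lt d hkv hnd k hkc
    have h1 : pvBound d k ≤ d.keys.length := List.length_filter_le _ _
    have h2 : d.size = d.keys.length := by simp [PySem.Dict.size, PySem.Dict.keys]
    omega
  rw [pvChainA_eq, hreachD k hk, hm]
  have hunf : pvVals d (m + 1) k = d.getD k 0 :: pvVals d m (d.getD k 0) := by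
    simp [pvVals, hkc]
  rw [hunf]
  have hstab : pvVals d (m + 1) (d.getD k 0) = pvVals d m (d.getD k 0) :=
    pvVals_stable d hkv hnd (m + 1) m (d.getD k 0) (by omega) (by omega)
  rw [hstab]
  simp
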